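-- pv_equiv track=rewrite | github.com/youngjinc/Algorithm-Study | week9/eunseo/test.py | solution
-- ===== SOURCE A (Python) =====
-- def solution(arr):
--   check = []
--   result = []
--
--   for j in arr:
--     if 1 < arr.count(j) and j not in check:
--       check.append(j)
--
--   for i in check:
--     result.append(arr.count(i))
--
--   if check == []:
--     return [-1]
--   else:
--     return result
-- ===== SOURCE B (Python) =====
-- def solution(arr):
--   counts = {}
--   for x in arr:
--     counts[x] = counts.get(x, 0) + 1
--   result = [c for c in counts.values() if c > 1]
--   return result if result else [-1]
-- ===== Notes on version B (the rewrite author's own statement) =====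
-- stated objective: faster
-- what changed: Replaced the two loops that each rescan arr with arr.count (plus the dedupe 'check' list with linear membership tests) by a single counting pass building an insertion-ordered dict, then a filter of its values for counts greater than 1.
import Mathlib
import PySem

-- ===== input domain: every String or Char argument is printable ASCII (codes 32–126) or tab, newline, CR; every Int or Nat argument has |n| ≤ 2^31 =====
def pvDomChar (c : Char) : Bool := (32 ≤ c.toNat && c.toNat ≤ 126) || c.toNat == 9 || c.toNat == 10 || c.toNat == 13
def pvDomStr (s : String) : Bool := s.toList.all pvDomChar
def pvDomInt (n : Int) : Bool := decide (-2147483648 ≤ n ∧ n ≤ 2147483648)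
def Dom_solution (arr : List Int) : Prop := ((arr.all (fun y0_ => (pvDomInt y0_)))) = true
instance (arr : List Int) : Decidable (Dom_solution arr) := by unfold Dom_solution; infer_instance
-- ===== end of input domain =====

-- B replaces A's quadratic rescans (arr.count inside two loops plus a dedupe list) with one
-- counting pass over arr and a filter of the count table; objective: faster.

-- ===== PORT A =====
def solution (arr : List Int) : List Int :=
  let check := arr.foldl (fun check j =>
    if 1 < PySem.List.count arr j ∧ j ∉ check then check ++ [j] else check) []
  let result := check.foldl (fun result i => result ++ [(PySem.List.count arr i : Int)]) []
  if check = [] then [-1] else result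

-- ===== PORT B =====
def solution_alt (arr : List Int) : List Int :=
  let counts := arr.foldl (fun d x => d.insert x (d.getD x 0 + 1)) PySem.Dict.empty
  let result := counts.values.filter (fun c => 1 < c)
  if result = [] then [-1] else result

-- ===== PRECONDITION & SPEC =====
def Spec_solution (arr : List Int) (out : List Int) : Prop := out = solution_alt arr
instance (arr : List Int) (out : List Int) : Decidable (Spec_solution arr out) := by unfold Spec_solution; infer_instance

-- ===== CLAIM (what is proved, stated in full; the proofs are below) =====
def Claim_equal_solution : Prop := ∀ (arr : List Int), Dom_solution arr → Spec_solution arr (solution arr)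

-- ===== LEMMAS AND PROOFS =====

-- A's first loop, with the accumulator generalized to the values already seen:
-- it builds the first occurrences (in order) of the values satisfying p.
lemma checkLoop (p : Int → Prop) [DecidablePred p] :
    ∀ (l seen : List Int),
      l.foldl (fun c j => if p j ∧ j ∉ c then c ++ [j] else c)
        ((PySem.Set.ofList seen).filter (fun j => decide (p j)))
      = (PySem.Set.ofList (seen ++ l)).filter (fun j => decide (p j)) := by
  intro l
  induction l with
  | nil => intro seen; simp
  | cons j l ih =>
    intro seen
    have hmem : j ∈ (PySem.Set.ofList seen).filter (fun j => decide (p j)) ↔ p j ∧ j ∈ seen := by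
      simp [List.mem_filter, PySem.Set.mem_ofList, and_comm]
    have hstep : (if p j ∧ j ∉ (PySem.Set.ofList seen).filter (fun j => decide (p j))
          then (PySem.Set.ofList seen).filter (fun j => decide (p j)) ++ [j]
          else (PySem.Set.ofList seen).filter (fun j => decide (p j)))
        = (PySem.Set.ofList (seen ++ [j])).filter (fun j => decide (p j)) := by
      rw [PySem.Set.ofList_append_singleton]
      by_cases hj : j ∈ seen
      · have hj' : j ∈ PySem.Set.ofList seen := (PySem.Set.mem_ofList seen j).mpr hj
        rw [PySem.Set.add_of_mem hj']
        simp [hmem, hj]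
      · rw [PySem.Set.add_of_not_mem (by simpa [PySem.Set.mem_ofList] using hj)]
        by_cases hp : p j
        · simp [hmem, hj, hp, List.filter_append]
        · simp [hmem, hj, hp, List.filter_append]
    simp only [List.foldl_cons]
    rw [hstep, ih (seen ++ [j])]
    simp

theorem solution_spec : Claim_equal_solution := by
  intro arr _
  unfold Spec_solution solution solution_alt
  -- A's check list is the first occurrences of the duplicated values, in order
  have hc : arr.foldl (fun c j => if 1 < PySem.List.count arr j ∧ j ∉ c then c ++ [j] else c) []
      = (PySem.Set.ofList arr).filter (fun j => decide (1 < PySem.List.count arr j)) := by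
    simpa using checkLoop (fun j => 1 < PySem.List.count arr j) arr []
  -- A's second loop is a map
  have hres : ∀ (c : List Int), c.foldl (fun r i => r ++ [((PySem.List.count arr i : Nat) : Int)]) []
      = c.map (fun i => ((PySem.List.count arr i : Nat) : Int)) := by
    intro c
    simpa using PySem.List.foldl_append_singleton_eq_map
      (fun i => ((PySem.List.count arr i : Nat) : Int)) c []
  -- B's dict is Counter(arr); its values are the counts of the first occurrences
  have hvals : (arr.foldl (fun d x => d.insert x (d.getD x 0 + 1)) PySem.Dict.empty).values
      = (PySem.Set.ofList arr).map (fun k => ((arr.count k : Nat) : Int)) := by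
    rw [PySem.Dict.foldl_insert_getD_add_one_eq_counter]
    simp [PySem.Dict.values, PySem.Dict.items_counter, List.map_map, Function.comp]
  simp only [hc, hres, hvals]
  -- filter of a map is a map of a filter, and the two predicates agree
  have hfm : ((PySem.Set.ofList arr).map (fun k => ((arr.count k : Nat) : Int))).filter
        (fun c => decide (1 < c))
      = ((PySem.Set.ofList arr).filter (fun j => decide (1 < PySem.List.count arr j))).map
        (fun k => ((arr.count k : Nat) : Int)) := by
    rw [List.filter_map]
    apply congrArg
    apply List.filter_congr
    intro k _
    simp [Function.comp, PySem.List.count_eq]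
  rw [hfm]
  simp [PySem.List.count_eq]
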